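-- pv_equiv track=rewrite | github.com/adam-blakey/advent-of-code | day_6/main.py | uniqueDictionary
-- ===== SOURCE A (Python) =====
-- from string import ascii_lowercase
--
-- def uniqueDictionary(answers):
--     temp = {}
--     for char in ascii_lowercase:
--         good = True
--         for answer in answers[:-1]:
--             if char not in answer:
--                 good = False
--
--         if good:
--             temp[char] = 1
--     return temp
-- ===== SOURCE B (Python) =====
-- from string import ascii_lowercase
--
-- def uniqueDictionary(answers):
--     common = set(ascii_lowercase)
--     for answer in answers[:-1]:
--         common &= set(answer)
--     return {c: 1 for c in ascii_lowercase if c in common}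
-- ===== Notes on version B (the rewrite author's own statement) =====
-- stated objective: simpler
-- what changed: Replaces A's 26 per-letter scans over answers[:-1] with a single pass that intersects a set seeded with the full alphabet, then emits {c: 1} for the surviving letters.
import Mathlib
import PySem

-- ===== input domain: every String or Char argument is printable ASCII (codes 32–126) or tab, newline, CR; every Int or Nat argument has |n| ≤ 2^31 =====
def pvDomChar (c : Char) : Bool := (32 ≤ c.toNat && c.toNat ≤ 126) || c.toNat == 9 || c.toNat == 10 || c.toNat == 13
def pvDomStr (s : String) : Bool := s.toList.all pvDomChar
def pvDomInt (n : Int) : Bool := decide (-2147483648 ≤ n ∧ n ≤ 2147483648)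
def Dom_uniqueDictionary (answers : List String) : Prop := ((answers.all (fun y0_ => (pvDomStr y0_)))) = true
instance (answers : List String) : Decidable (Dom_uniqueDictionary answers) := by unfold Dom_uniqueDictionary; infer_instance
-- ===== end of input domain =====

-- B replaces A's 26×n per-letter membership loops with a single set-intersection pass
-- over answers[:-1] (simpler); same return value everywhere.

def pvAlphabet : List Char :=
  ['a','b','c','d','e','f','g','h','i','j','k','l','m',
   'n','o','p','q','r','s','t','u','v','w','x','y','z']

-- ===== PORT A =====
def uniqueDictionary (answers : List String) : List (String × Int) :=
  (pvAlphabet.foldl (fun (temp : PySem.Dict String Int) ch =>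
      let good := (PySem.List.slice answers none (some (-1))).foldl
        (fun g answer => if !(PySem.Str.isIn (String.ofList [ch]) answer) then false else g) true
      if good then temp.insert (String.ofList [ch]) 1 else temp)
    PySem.Dict.empty).items

-- ===== PORT B =====
def uniqueDictionary_alt (answers : List String) : List (String × Int) :=
  let common : PySem.Set Char :=
    answers.dropLast.foldl
      (fun s answer => PySem.Set.inter s (PySem.Set.ofList answer.toList))
      (PySem.Set.ofList pvAlphabet)
  ((pvAlphabet.filter (fun c => PySem.Set.contains common c)).foldl
      (fun (d : PySem.Dict String Int) c => d.insert (String.ofList [c]) 1)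
      PySem.Dict.empty).items

-- ===== PRECONDITION & SPEC =====
def Spec_uniqueDictionary (answers : List String) (out : List (String × Int)) : Prop := out = uniqueDictionary_alt answers
instance (answers : List String) (out : List (String × Int)) : Decidable (Spec_uniqueDictionary answers out) := by unfold Spec_uniqueDictionary; infer_instance

-- ===== CLAIM (what is proved, stated in full; the proofs are below) =====
def Claim_equal_uniqueDictionary : Prop := ∀ (answers : List String), Dom_uniqueDictionary answers → Spec_uniqueDictionary answers (uniqueDictionary answers)

-- ===== LEMMAS AND PROOFS =====

-- a one-character needle is an infix iff the character is a member
theorem singleton_infix (c : Char) (l : List Char) : [c] <:+: l ↔ c ∈ l := by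
  constructor
  · intro h; exact List.singleton_sublist.mp h.sublist
  · intro h
    obtain ⟨s, t, rfl⟩ := List.append_of_mem h
    exact ⟨s, t, by simp⟩

-- 'ch in answer' for a one-character needle is list membership
theorem isIn_singleton (c : Char) (s : String) :
    PySem.Str.isIn (String.ofList [c]) s = s.toList.contains c := by
  rw [Bool.eq_iff_iff]
  simp [PySem.Chars.isIn_iff_infix, singleton_infix]

-- A's inner loop computes 'contained in every answer of the slice'
theorem goodFold (xs : List String) (c : Char) (g : Bool) :
    xs.foldl (fun g answer => if !(PySem.Str.isIn (String.ofList [c]) answer) then false else g) g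
      = (g && xs.all (fun a => a.toList.contains c)) := by
  induction xs generalizing g with
  | nil => simp
  | cons a xs ih =>
    rw [List.foldl_cons, ih, List.all_cons, isIn_singleton]
    cases a.toList.contains c <;> cases g <;> simp

-- B's intersection loop: membership = membership in the seed and in every answer
theorem interFold (xs : List String) (s : PySem.Set Char) (c : Char) :
    (c ∈ xs.foldl (fun s a => PySem.Set.inter s (PySem.Set.ofList a.toList)) s)
      ↔ (c ∈ s ∧ ∀ a ∈ xs, c ∈ a.toList) := by
  induction xs generalizing s with
  | nil => simp
  | cons a xs ih =>
    simp only [List.foldl_cons, ih, PySem.Set.mem_inter, PySem.Set.mem_ofList, List.mem_cons, forall_eq_or_imp]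
    tauto

-- for a letter of the alphabet, A's flag equals membership in B's intersected set
theorem cond_eq (answers : List String) (ch : Char) (h : ch ∈ pvAlphabet) :
    (answers.dropLast.foldl
        (fun g answer => if !(PySem.Str.isIn (String.ofList [ch]) answer) then false else g) true)
      = PySem.Set.contains
          (answers.dropLast.foldl
            (fun s a => PySem.Set.inter s (PySem.Set.ofList a.toList))
            (PySem.Set.ofList pvAlphabet)) ch := by
  rw [goodFold, Bool.eq_iff_iff]
  simp only [Bool.true_and, List.all_eq_true, PySem.Set.contains_iff, interFold,
    PySem.Set.mem_ofList, List.contains_iff_mem]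
  tauto

-- conditional insert over a list = unconditional insert over the filtered list
theorem foldl_ite_insert (cs : List Char) (p : Char → Bool) (d : PySem.Dict String Int) :
    cs.foldl (fun d c => if p c then d.insert (String.ofList [c]) 1 else d) d
      = (cs.filter p).foldl (fun d c => d.insert (String.ofList [c]) 1) d := by
  induction cs generalizing d with
  | nil => rfl
  | cons c cs ih =>
    rw [List.foldl_cons, List.filter_cons]
    cases p c
    · rw [if_neg (by simp), if_neg (by simp)]; exact ih d
    · rw [if_pos rfl, if_pos rfl, List.foldl_cons]; exact ih _

-- ===== VERDICT (by name: the statement is the Claim_ definition above) =====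
theorem uniqueDictionary_spec : Claim_equal_uniqueDictionary := by
  intro answers _
  unfold Spec_uniqueDictionary uniqueDictionary uniqueDictionary_alt
  rw [PySem.List.slice_to_neg_one]
  rw [PySem.List.foldl_congr_mem pvAlphabet _
      (fun (temp : PySem.Dict String Int) ch =>
        if PySem.Set.contains
            (answers.dropLast.foldl
              (fun s a => PySem.Set.inter s (PySem.Set.ofList a.toList))
              (PySem.Set.ofList pvAlphabet)) ch
        then temp.insert (String.ofList [ch]) 1 else temp)
      PySem.Dict.empty
      (by intro acc x hx; simp only [cond_eq answers x hx])]
  rw [foldl_ite_insert]
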